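-- pv_equiv track=rewrite | github.com/blainehill2001/Puzzles | IBM/December.py | count_circles
-- ===== SOURCE A (Python) =====
-- def is_grid_point(x, y):
--     # Check if the given coordinates are grid points
--     return x % 1 == 0 and y % 1 == 0
--
-- def count_circles(m_range):
--     count = 0
--
--     for x in range(1, m_range + 1):
--         for y in range(0, x):
--             for r in range(m_range * x, (m_range + 1) * x):
--                 # Equation of a circle: (x-a)^2 + (y-b)^2 = r^2
--                 # Since (0,0) is a grid point, the equation becomes x^2 + y^2 = r^2
--                 if is_grid_point(x, y) and x**2 + y**2 <= r**2:
--                     count += 1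
--
--     return count
-- ===== SOURCE B (Python) =====
-- def count_circles(m_range):
--     # Inside A's loops (x from one to m_range, y below x) every candidate
--     # radius r in [m_range*x, (m_range+1)*x) satisfies x**2 + y**2 <= r**2,
--     # because x**2 + y**2 <= (m_range*x)**2 there.  So each (x, y) contributes
--     # exactly x radii and the total is the sum of the squares of all x up to
--     # m_range: a closed form.
--     if m_range <= 0:
--         return 0
--     return m_range * (m_range + 1) * (2 * m_range + 1) // 6
-- ===== Notes on version B (the rewrite author's own statement) =====
-- stated objective: faster
-- what changed: All three loops are eliminated: within the iteration space every candidate radius satisfies the circle inequality, so the count equals the sum of the squares of all x up to m_range, computed by the closed form m(m+1)(2m+1)//6.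
import Mathlib
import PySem

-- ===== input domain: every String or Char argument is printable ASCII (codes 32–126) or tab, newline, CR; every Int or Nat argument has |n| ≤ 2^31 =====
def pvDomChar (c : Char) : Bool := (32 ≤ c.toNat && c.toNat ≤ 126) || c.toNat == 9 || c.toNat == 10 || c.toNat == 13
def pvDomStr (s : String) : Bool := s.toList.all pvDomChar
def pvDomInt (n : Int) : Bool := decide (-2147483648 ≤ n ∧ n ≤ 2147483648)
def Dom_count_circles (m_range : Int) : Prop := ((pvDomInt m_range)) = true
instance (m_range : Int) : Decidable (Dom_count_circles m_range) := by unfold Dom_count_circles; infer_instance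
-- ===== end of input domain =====

-- B replaces A's three nested loops by the closed form m(m+1)(2m+1)//6 (sum of squares):
-- inside A's loops every candidate radius satisfies the inequality; measured faster (asymptotic).

-- ===== PORT A =====
def is_grid_point (x y : Int) : Bool :=
  (PySem.Int.mod x 1 == 0) && (PySem.Int.mod y 1 == 0)

def count_circles (m_range : Int) : Int :=
  (PySem.List.pyRange 1 (m_range + 1) 1).foldl (fun count x =>
    (PySem.List.pyRange 0 x 1).foldl (fun count y =>
      (PySem.List.pyRange (m_range * x) ((m_range + 1) * x) 1).foldl (fun count r =>
        if is_grid_point x y && decide (x ^ 2 + y ^ 2 ≤ r ^ 2) then count + 1 else count)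
        count)
      count)
    0

-- ===== PORT B =====
def count_circles_alt (m_range : Int) : Int :=
  if m_range ≤ 0 then 0
  else PySem.Int.floordiv (m_range * (m_range + 1) * (2 * m_range + 1)) 6

-- ===== PRECONDITION & SPEC =====
def Spec_count_circles (m_range : Int) (out : Int) : Prop := out = count_circles_alt m_range
instance (m_range : Int) (out : Int) : Decidable (Spec_count_circles m_range out) := by unfold Spec_count_circles; infer_instance

-- ===== CLAIM (what is proved, stated in full; the proofs are below) =====
def Claim_equal_count_circles : Prop := ∀ (m_range : Int), Dom_count_circles m_range → Spec_count_circles m_range (count_circles m_range)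

-- ===== LEMMAS AND PROOFS =====

-- when n ≤ lo², every r in range(lo, hi) passes the test, so the loop adds max 0 (hi - lo)
theorem rloop_const (hi n : Int) :
    ∀ (k : Nat) (lo c : Int), (hi - lo).toNat = k → 0 ≤ lo → n ≤ lo * lo →
    (PySem.List.pyRange lo hi 1).foldl (fun c r => if n ≤ r * r then c + 1 else c) c
    = c + max 0 (hi - lo) := by
  intro k
  induction k with
  | zero =>
      intro lo c hk h0 hn
      rw [PySem.List.pyRange_one_eq_nil (by omega)]
      simp only [List.foldl_nil]
      omega
  | succ k ih =>
      intro lo c hk h0 hn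
      rw [PySem.List.pyRange_one_cons (by omega), List.foldl_cons, if_pos hn]
      rw [ih (lo + 1) (c + 1) (by omega) (by omega) (by nlinarith)]
      omega

-- the whole y-loop of A contributes exactly x * x when 1 ≤ x ≤ m
theorem yloop_const (m x c : Int) (hx : 1 ≤ x) (hm : x ≤ m) :
    (PySem.List.pyRange 0 x 1).foldl (fun c y =>
      (PySem.List.pyRange (m * x) ((m + 1) * x) 1).foldl
        (fun c r => if x * x + y * y ≤ r * r then c + 1 else c) c) c
    = c + x * x := by
  have step : ∀ (c' y : Int), y ∈ PySem.List.pyRange 0 x 1 →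
      (PySem.List.pyRange (m * x) ((m + 1) * x) 1).foldl
        (fun c r => if x * x + y * y ≤ r * r then c + 1 else c) c'
      = c' + x := by
    intro c' y hy
    obtain ⟨hy0, hyx⟩ := PySem.List.mem_pyRange_one.mp hy
    have hcond : x * x + y * y ≤ (m * x) * (m * x) := by
      by_cases h2 : 2 ≤ m
      · have hy2 : y * y ≤ x * x := by nlinarith
        have hmm : (2 : Int) ≤ m * m := by nlinarith
        have h4 := mul_le_mul_of_nonneg_right hmm (by positivity : (0 : Int) ≤ x * x)
        nlinarith [hy2, h4]
      · have hmx1 : m = 1 := by omega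
        have hx1 : x = 1 := by omega
        have hy1 : y = 0 := by omega
        subst hmx1; subst hx1; subst hy1; norm_num
    rw [rloop_const ((m + 1) * x) (x * x + y * y) (((m + 1) * x - (m * x)).toNat) (m * x) c'
          rfl (by nlinarith) hcond]
    have hd : (m + 1) * x - m * x = x := by ring
    rw [hd]
    omega
  rw [PySem.List.foldl_congr_mem _ _ (fun c _ => c + x) _ step,
      PySem.List.foldl_add _ (fun _ => x) c,
      PySem.List.sum_map_const_int, PySem.List.length_pyRange_one]
  have hx0 : ((x - 0).toNat : Int) = x := by omega
  rw [hx0]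

-- sum of squares over range(1, k+1), without division
theorem sumsq (k : Nat) :
    6 * (PySem.List.pyRange 1 ((k : Int) + 1) 1).foldl (fun c x => c + x * x) 0
    = (k : Int) * ((k : Int) + 1) * (2 * (k : Int) + 1) := by
  induction k with
  | zero =>
      rw [PySem.List.pyRange_one_eq_nil (by norm_num)]
      simp
  | succ k ih =>
      push_cast
      rw [PySem.List.pyRange_one_succ_right (by omega : (1 : Int) ≤ (k : Int) + 1)]
      rw [List.foldl_append]
      simp only [List.foldl_cons, List.foldl_nil]
      linear_combination ih

-- ===== VERDICT (by name: the statement is the Claim_ definition above) =====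
theorem count_circles_spec : Claim_equal_count_circles := by
  intro m _
  unfold Spec_count_circles count_circles count_circles_alt
  by_cases hm : m ≤ 0
  · rw [if_pos hm, PySem.List.pyRange_one_eq_nil (by omega)]
    rfl
  · rw [if_neg hm]
    have hstep : ∀ (c x : Int), x ∈ PySem.List.pyRange 1 (m + 1) 1 →
        (PySem.List.pyRange 0 x 1).foldl (fun count y =>
          (PySem.List.pyRange (m * x) ((m + 1) * x) 1).foldl (fun count r =>
            if is_grid_point x y && decide (x ^ 2 + y ^ 2 ≤ r ^ 2) then count + 1 else count)
            count)
          c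
        = c + x * x := by
      intro c x hx
      obtain ⟨hx1, hx2⟩ := PySem.List.mem_pyRange_one.mp hx
      have hcond : ∀ y r : Int,
          (is_grid_point x y && decide (x ^ 2 + y ^ 2 ≤ r ^ 2))
          = decide (x * x + y * y ≤ r * r) := by
        intro y r
        rw [show is_grid_point x y = true from by simp [is_grid_point], Bool.true_and]
        congr 1
        simp [pow_two]
      simp only [hcond, decide_eq_true_eq]
      exact yloop_const m x c hx1 (by omega)
    rw [PySem.List.foldl_congr_mem _ _ (fun c x => c + x * x) _ hstep]
    obtain ⟨k, hk⟩ : ∃ k : Nat, m = (k : Int) := ⟨m.toNat, by omega⟩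
    subst hk
    have h6 := sumsq k
    have hfd : PySem.Int.floordiv ((k : Int) * ((k : Int) + 1) * (2 * (k : Int) + 1)) 6
        = (PySem.List.pyRange 1 ((k : Int) + 1) 1).foldl (fun c x => c + x * x) 0 := by
      rw [PySem.Int.floordiv_eq_iff_of_pos (by norm_num : (0 : Int) < 6)]
      constructor <;> linarith
    exact hfd.symm
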